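-- pv_equiv track=rewrite | github.com/msmenegol/aoc2023 | aoc2023/day11.py | find_expanded_distance
-- ===== SOURCE A (Python) =====
-- def find_expanded_distance(p1, p2, empty_points, expand_factor):
--   dist = 0
--   high = p2
--   low = p1
--   if p1 > p2:
--     high = p1
--     low = p2
--   for p in range(low,high):
--     if p in empty_points:
--       dist += expand_factor
--     else:
--       dist += 1
--   return dist
-- ===== SOURCE B (Python) =====
-- def find_expanded_distance(p1, p2, empty_points, expand_factor):
--   low, high = (p2, p1) if p1 > p2 else (p1, p2)
--   empties = len({e for e in empty_points if low <= e < high})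
--   return (high - low) + (expand_factor - 1) * empties
-- ===== Notes on version B (the rewrite author's own statement) =====
-- stated objective: simpler
-- what changed: Replaced the loop over every integer in range(low,high) (each iteration scanning empty_points for membership) by a single pass collecting the distinct in-range empty points and the closed form (high-low)+(expand_factor-1)*count.
import Mathlib
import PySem

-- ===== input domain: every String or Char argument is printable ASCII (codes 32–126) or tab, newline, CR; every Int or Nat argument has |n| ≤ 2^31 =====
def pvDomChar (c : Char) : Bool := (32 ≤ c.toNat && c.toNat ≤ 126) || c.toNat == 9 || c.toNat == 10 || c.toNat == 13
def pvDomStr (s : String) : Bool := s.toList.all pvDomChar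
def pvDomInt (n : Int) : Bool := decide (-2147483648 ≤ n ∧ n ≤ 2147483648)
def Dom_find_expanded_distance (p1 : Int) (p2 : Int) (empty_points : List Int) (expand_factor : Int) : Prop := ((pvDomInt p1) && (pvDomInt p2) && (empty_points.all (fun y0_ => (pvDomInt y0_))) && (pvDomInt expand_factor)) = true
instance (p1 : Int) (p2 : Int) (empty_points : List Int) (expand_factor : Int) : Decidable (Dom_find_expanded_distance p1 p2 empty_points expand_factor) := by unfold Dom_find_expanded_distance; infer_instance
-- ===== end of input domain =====

-- B replaces A's per-point loop with one pass collecting the in-range empty points into a set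
-- and a closed-form formula; objective: simpler (no measured speed claim).

-- ===== PORT A =====
def find_expanded_distance (p1 : Int) (p2 : Int) (empty_points : List Int) (expand_factor : Int) : Int :=
  let dist : Int := 0
  let high := p2
  let low := p1
  let lh := if p1 > p2 then (p2, p1) else (low, high)
  (PySem.List.pyRange lh.1 lh.2 1).foldl
    (fun dist p => if p ∈ empty_points then dist + expand_factor else dist + 1) dist

-- ===== PORT B =====
def find_expanded_distance_alt (p1 : Int) (p2 : Int) (empty_points : List Int) (expand_factor : Int) : Int :=
  let lh := if p1 > p2 then (p2, p1) else (p1, p2)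
  let low := lh.1
  let high := lh.2
  let empties : Int :=
    (PySem.Set.ofList (empty_points.filter (fun e => decide (low ≤ e) && decide (e < high)))).length
  (high - low) + (expand_factor - 1) * empties

-- ===== PRECONDITION & SPEC =====
def Spec_find_expanded_distance (p1 : Int) (p2 : Int) (empty_points : List Int) (expand_factor : Int) (out : Int) : Prop := out = find_expanded_distance_alt p1 p2 empty_points expand_factor
instance (p1 : Int) (p2 : Int) (empty_points : List Int) (expand_factor : Int) (out : Int) : Decidable (Spec_find_expanded_distance p1 p2 empty_points expand_factor out) := by unfold Spec_find_expanded_distance; infer_instance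

-- ===== CLAIM (what is proved, stated in full; the proofs are below) =====
def Claim_equal_find_expanded_distance : Prop := ∀ (p1 : Int) (p2 : Int) (empty_points : List Int) (expand_factor : Int), Dom_find_expanded_distance p1 p2 empty_points expand_factor → Spec_find_expanded_distance p1 p2 empty_points expand_factor (find_expanded_distance p1 p2 empty_points expand_factor)

-- ===== LEMMAS AND PROOFS =====

-- The loop of A equals the closed form with the count taken over the range.
theorem pv_fold_closed (ep : List Int) (ef : Int) :
    ∀ (n : Nat) (a : Int) (init : Int), 
      (PySem.List.pyRange a (a + n) 1).foldl
        (fun d p => if p ∈ ep then d + ef else d + 1) init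
      = init + (n : Int) + (ef - 1) * ((PySem.List.pyRange a (a + n) 1).countP (fun p => decide (p ∈ ep))) := by
  intro n
  induction n with
  | zero => intro a init; simp [PySem.List.pyRange_one_eq_nil (le_refl a)]
  | succ k ih =>
    intro a init
    have hlt : a < a + ((k:Nat)+1:Nat) := by omega
    rw [PySem.List.pyRange_one_cons hlt]
    have h2 : a + ((k:Nat)+1:Nat) = (a+1) + (k:Nat) := by omega
    simp only [List.foldl_cons, List.countP_cons, h2, ih]
    by_cases hp : a ∈ ep <;> simp [hp] <;> [skip; push_cast] <;> ring

-- The count over the range equals the count over the deduplicated list.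
theorem pv_count_eq (ep : List Int) (a b : Int) :
    ((PySem.List.pyRange a b 1).countP (fun p => decide (p ∈ ep)) : Int)
      = (PySem.Set.ofList (ep.filter (fun e => decide (a ≤ e) && decide (e < b)))).length := by
  have h1 : (PySem.List.pyRange a b 1).countP (fun p => decide (p ∈ ep))
      = ((PySem.List.pyRange a b 1).filter (fun p => decide (p ∈ ep))).length := by
    rw [List.countP_eq_length_filter]
  rw [h1]
  have nd1 : ((PySem.List.pyRange a b 1).filter (fun p => decide (p ∈ ep))).Nodup :=
    (PySem.List.nodup_pyRange_one a b).filter _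
  have nd2 : (PySem.Set.ofList (ep.filter (fun e => decide (a ≤ e) && decide (e < b)))).Nodup :=
    PySem.Set.nodup_ofList _
  have hperm : ((PySem.List.pyRange a b 1).filter (fun p => decide (p ∈ ep))).Perm
      (PySem.Set.ofList (ep.filter (fun e => decide (a ≤ e) && decide (e < b)))) := by
    apply (List.perm_ext_iff_of_nodup nd1 nd2).mpr
    intro x
    simp [List.mem_filter, PySem.List.mem_pyRange_one, PySem.Set.mem_ofList, and_comm, and_assoc]
  rw [hperm.length_eq]

-- ===== VERDICT (by name: the statement is the Claim_ definition above) =====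
theorem find_expanded_distance_spec : Claim_equal_find_expanded_distance := by
  intro p1 p2 ep ef _
  unfold Spec_find_expanded_distance find_expanded_distance find_expanded_distance_alt
  by_cases h : p1 > p2 <;> simp only [h, if_pos, ite_false]
  · have hn : p1 = p2 + ((p1 - p2).toNat : Int) := by omega
    rw [show PySem.List.pyRange p2 p1 1 = PySem.List.pyRange p2 (p2 + ((p1 - p2).toNat : Int)) 1 from by rw [← hn]]
    rw [pv_fold_closed ep ef (p1 - p2).toNat p2 0]
    rw [← hn, pv_count_eq ep p2 p1]
    have : ((p1 - p2).toNat : Int) = p1 - p2 := by omega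
    rw [this]; ring
  · have hle : p1 ≤ p2 := by omega
    have hn : p2 = p1 + ((p2 - p1).toNat : Int) := by omega
    rw [show PySem.List.pyRange p1 p2 1 = PySem.List.pyRange p1 (p1 + ((p2 - p1).toNat : Int)) 1 from by rw [← hn]]
    rw [pv_fold_closed ep ef (p2 - p1).toNat p1 0]
    rw [← hn, pv_count_eq ep p1 p2]
    have : ((p2 - p1).toNat : Int) = p2 - p1 := by omega
    rw [this]; ring
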